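-- pv_equiv track=rewrite | github.com/DyhaCreator/programming_tasks | нарешка/scool_et/sup.py | f
-- ===== SOURCE A (Python) =====
-- def f(a):
--     ans = 0
--     for i in range(0, a + 1):
--         s = 0
--         b = i
--         while(b > 0):
--             s += b % 10
--             b = b // 10
--         if(s % 2 == 1):
--             ans += 1
--     return ans
-- ===== SOURCE B (Python) =====
-- def f(a):
--     # Closed form: every block of ten consecutive numbers 10q..10q+9 contains
--     # exactly five numbers with odd digit sum; only the final partial block
--     # depends on the parity of digitsum(q).
--     if a < 0:
--         return 0
--     n = a + 1
--     q, r = divmod(n, 10)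
--     s = 0
--     b = q
--     while b > 0:
--         s += b % 10
--         b //= 10
--     if s % 2 == 0:
--         return 5 * q + r // 2
--     else:
--         return 5 * q + (r + 1) // 2
-- ===== Notes on version B (the rewrite author's own statement) =====
-- stated objective: faster
-- what changed: Replaces the O(a)-iteration digit-sum scan with a closed-form count: each block of ten consecutive numbers has exactly five odd-digit-sum members, so only q=(a+1)//10's digit-sum parity and the remainder decide the answer.
import Mathlib
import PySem

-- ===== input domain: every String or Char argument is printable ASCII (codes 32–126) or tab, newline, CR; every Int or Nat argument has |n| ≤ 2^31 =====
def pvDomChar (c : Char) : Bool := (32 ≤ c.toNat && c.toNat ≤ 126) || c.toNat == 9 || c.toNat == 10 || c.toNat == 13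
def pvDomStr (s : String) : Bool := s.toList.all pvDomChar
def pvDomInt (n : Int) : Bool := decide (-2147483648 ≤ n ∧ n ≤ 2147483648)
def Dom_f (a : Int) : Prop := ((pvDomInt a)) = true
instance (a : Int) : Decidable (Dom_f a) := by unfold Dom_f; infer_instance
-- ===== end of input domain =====

-- B replaces the per-number O(a) digit-sum scan by a closed-form count (each block of
-- ten consecutive numbers holds exactly five odd-digit-sum numbers); objective: faster.

-- ===== PORT A =====
-- the inner 'while b > 0: s += b % 10; b = b // 10' loop (also appears verbatim in B)
def dsum (s b : Int) : Int :=
  if 0 < b then dsum (s + PySem.Int.mod b 10) (PySem.Int.floordiv b 10) else s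
termination_by b.toNat
decreasing_by
  rw [PySem.Int.floordiv_eq_ediv_of_pos (by omega)]
  omega

def f (a : Int) : Int :=
  (PySem.List.pyRange 0 (a + 1) 1).foldl
    (fun ans i => if PySem.Int.mod (dsum 0 i) 2 = 1 then ans + 1 else ans) 0

-- ===== PORT B =====
def f_alt (a : Int) : Int :=
  if a < 0 then 0
  else
    let q := PySem.Int.floordiv (a + 1) 10
    let r := PySem.Int.mod (a + 1) 10
    let s := dsum 0 q
    if PySem.Int.mod s 2 = 0 then 5 * q + PySem.Int.floordiv r 2
    else 5 * q + PySem.Int.floordiv (r + 1) 2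

-- ===== PRECONDITION & SPEC =====
def Spec_f (a : Int) (out : Int) : Prop := out = f_alt a
instance (a : Int) (out : Int) : Decidable (Spec_f a out) := by unfold Spec_f; infer_instance

-- ===== CLAIM (what is proved, stated in full; the proofs are below) =====
def Claim_equal_f : Prop := ∀ (a : Int), Dom_f a → Spec_f a (f a)

-- ===== LEMMAS AND PROOFS =====

-- digit sum on Nat, for reasoning
def nds (n : Nat) : Nat :=
  if n = 0 then 0 else n % 10 + nds (n / 10)
decreasing_by omega

lemma nds_zero : nds 0 = 0 := by rw [nds]; rfl

lemma nds_unfold (n : Nat) : nds n = n % 10 + nds (n / 10) := by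
  by_cases h : n = 0
  · subst h; simp [nds_zero]
  · rw [nds, if_neg h]

lemma dsum_eq (n : Nat) (s : Int) : dsum s (n : Int) = s + (nds n : Int) := by
  induction n using Nat.strong_induction_on generalizing s with
  | _ n ih =>
    rw [dsum]
    by_cases h : n = 0
    · subst h; simp [nds_zero]
    · have hpos : (0 : Int) < (n : Int) := by omega
      have hdiv : PySem.Int.floordiv (n : Int) 10 = ((n / 10 : Nat) : Int) := by
        rw [PySem.Int.floordiv_eq_ediv_of_pos (by omega)]; omega
      have hmod : PySem.Int.mod (n : Int) 10 = ((n % 10 : Nat) : Int) := by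
        rw [PySem.Int.mod_eq_emod_of_pos (by omega)]; omega
      rw [if_pos hpos, hdiv, hmod, ih (n / 10) (by omega), nds_unfold n]
      push_cast; ring

-- closed-form count of odd-digit-sum numbers in [0, n)
def G (n : Nat) : Nat :=
  5 * (n / 10) + (if nds (n / 10) % 2 = 0 then (n % 10) / 2 else (n % 10 + 1) / 2)

lemma G_succ (n : Nat) : G (n + 1) = G n + (if nds n % 2 = 1 then 1 else 0) := by
  have hn := nds_unfold n
  by_cases h9 : n % 10 = 9
  · have h1 : (n + 1) / 10 = n / 10 + 1 := by omega
    have h2 : (n + 1) % 10 = 0 := by omega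
    unfold G
    rw [h1, h2, hn, h9]
    split_ifs <;> omega
  · have h1 : (n + 1) / 10 = n / 10 := by omega
    have h2 : (n + 1) % 10 = n % 10 + 1 := by omega
    unfold G
    rw [h1, h2, hn]
    split_ifs <;> omega

lemma fold_eq (m : Nat) :
    (PySem.List.pyRange 0 (m : Int) 1).foldl
      (fun ans i => if PySem.Int.mod (dsum 0 i) 2 = 1 then ans + 1 else ans) 0 = (G m : Int) := by
  induction m with
  | zero =>
    rw [PySem.List.pyRange_one_eq_nil (by omega)]
    simp [G, nds_zero]
  | succ m ih =>
    have hc : ((m + 1 : Nat) : Int) = (m : Int) + 1 := by push_cast; ring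
    rw [hc, PySem.List.pyRange_one_succ_right (by omega), List.foldl_append, ih]
    simp only [List.foldl]
    rw [dsum_eq m 0, G_succ]
    have hm : PySem.Int.mod ((0 : Int) + (nds m : Int)) 2 = ((nds m % 2 : Nat) : Int) := by
      rw [PySem.Int.mod_eq_emod_of_pos (by omega)]; omega
    rw [hm]
    split_ifs with h1 h2 h2 <;> push_cast at * <;> omega

-- ===== VERDICT (by name: the statement is the Claim_ definition above) =====
theorem f_spec : Claim_equal_f := by
  intro a _
  unfold Spec_f f f_alt
  by_cases ha : a < 0
  · rw [if_pos ha, PySem.List.pyRange_one_eq_nil (by omega)]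
    rfl
  · rw [if_neg ha]
    have hm : (a + 1) = (((a + 1).toNat : Nat) : Int) := by omega
    rw [hm, fold_eq]
    set m := (a + 1).toNat with hmdef
    have hq : PySem.Int.floordiv ((m : Nat) : Int) 10 = ((m / 10 : Nat) : Int) := by
      rw [PySem.Int.floordiv_eq_ediv_of_pos (by omega)]; omega
    have hr : PySem.Int.mod ((m : Nat) : Int) 10 = ((m % 10 : Nat) : Int) := by
      rw [PySem.Int.mod_eq_emod_of_pos (by omega)]; omega
    simp only [hq, hr, dsum_eq (m / 10) 0]
    have hs : PySem.Int.mod ((0 : Int) + (nds (m / 10) : Nat)) 2 = ((nds (m / 10) % 2 : Nat) : Int) := by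
      rw [PySem.Int.mod_eq_emod_of_pos (by omega)]; omega
    have hd1 : PySem.Int.floordiv ((m % 10 : Nat) : Int) 2 = ((m % 10 / 2 : Nat) : Int) := by
      rw [PySem.Int.floordiv_eq_ediv_of_pos (by omega)]; omega
    have hd2 : PySem.Int.floordiv (((m % 10 : Nat) : Int) + 1) 2 = (((m % 10 + 1) / 2 : Nat) : Int) := by
      rw [PySem.Int.floordiv_eq_ediv_of_pos (by omega)]; omega
    rw [hs, hd1, hd2]
    unfold G
    split_ifs with h1 h2 h2 <;> push_cast at * <;> omega
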